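-- pv_equiv track=rewrite | github.com/AndrewNordstrom/corgi-recommender-service | routes/recommendations.py | natural_diversity_shuffle
-- ===== SOURCE A (Python) =====
-- def natural_diversity_shuffle(recommendations, personalized_count):
--     """Naturally shuffle diverse content throughout the timeline"""
--     if len(recommendations) <= personalized_count:
--         return recommendations
--
--     # Keep personalized posts in order, insert diverse posts at natural intervals
--     personalized = recommendations[:personalized_count]
--     diverse = recommendations[personalized_count:]
--
--     # Insert diverse posts at strategic positions (every 3-4 posts)
--     result = []
--     diverse_index = 0
--
--     for i, post in enumerate(personalized):
--         result.append(post)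
--
--         # Insert diverse content every 3-4 posts
--         if diverse_index < len(diverse) and (i + 1) % 3 == 0:
--             result.append(diverse[diverse_index])
--             diverse_index += 1
--
--     # Add any remaining diverse posts
--     result.extend(diverse[diverse_index:])
--
--     return result
-- ===== SOURCE B (Python) =====
-- def natural_diversity_shuffle(recommendations, personalized_count):
--     """Naturally shuffle diverse content throughout the timeline"""
--     if len(recommendations) <= personalized_count:
--         return recommendations
--     return _interleave(recommendations[:personalized_count],
--                        recommendations[personalized_count:])
--
--
-- def _interleave(personalized, diverse):
--     # One diverse post goes after each complete group of 3 personalized posts;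
--     # whatever is left over (a partial group, then the unused diverse posts) is
--     # appended as-is.
--     if len(personalized) >= 3 and diverse:
--         return personalized[:3] + [diverse[0]] + _interleave(personalized[3:], diverse[1:])
--     return personalized + diverse
-- ===== Notes on version B (the rewrite author's own statement) =====
-- stated objective: simpler
-- what changed: Replaces the enumerate loop with its (i+1)%3 counter and diverse_index bookkeeping by a short recursion that consumes the personalized list in chunks of 3, pairing each complete chunk with one diverse post.
import Mathlib
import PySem

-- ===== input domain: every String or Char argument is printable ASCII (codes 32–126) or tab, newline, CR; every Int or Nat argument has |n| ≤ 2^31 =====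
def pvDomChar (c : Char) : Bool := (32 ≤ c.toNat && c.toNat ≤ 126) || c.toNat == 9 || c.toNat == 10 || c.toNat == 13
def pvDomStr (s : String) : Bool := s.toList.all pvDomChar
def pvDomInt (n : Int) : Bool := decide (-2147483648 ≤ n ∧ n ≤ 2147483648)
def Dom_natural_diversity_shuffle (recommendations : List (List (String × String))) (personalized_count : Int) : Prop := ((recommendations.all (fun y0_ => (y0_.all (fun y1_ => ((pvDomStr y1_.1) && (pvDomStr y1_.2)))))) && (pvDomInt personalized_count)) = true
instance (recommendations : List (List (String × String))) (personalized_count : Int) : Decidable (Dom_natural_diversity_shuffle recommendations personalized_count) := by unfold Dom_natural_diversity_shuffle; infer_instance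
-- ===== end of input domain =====

-- B replaces A's enumerate loop (with its (i+1)%3 test and diverse_index counter) by a
-- short recursion over chunks of 3 personalized posts; same return value, no speed claim.

-- ===== PORT A =====
-- literal transliteration of A: the for-loop over enumerate(personalized) is a foldl over
-- PySem.List.enumerate with state (result, diverse_index); diverse[diverse_index] is
-- pyGet? with .getD [] (the guard diverse_index < len(diverse) keeps the index in range,
-- so the default is never used and the port is exact).
def natural_diversity_shuffle (recommendations : List (List (String × String))) (personalized_count : Int) : List (List (String × String)) :=
  if (recommendations.length : Int) ≤ personalized_count then recommendations
  else
    let personalized := PySem.List.slice recommendations none (some personalized_count)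
    let diverse := PySem.List.slice recommendations (some personalized_count) none
    let st := (PySem.List.enumerate personalized).foldl
      (fun (st : List (List (String × String)) × Int) ip =>
        let result := st.1 ++ [ip.2]
        if st.2 < (diverse.length : Int) ∧ PySem.Int.mod (ip.1 + 1) 3 = 0 then
          (result ++ [(PySem.List.pyGet? diverse st.2).getD []], st.2 + 1)
        else (result, st.2)) ([], 0)
    st.1 ++ PySem.List.slice diverse (some st.2) none

-- ===== PORT B =====
-- _interleave from Source B: 'len(p) >= 3 and diverse' with the slices p[:3]/p[3:]/d[1:] is the
-- three-cons pattern; the fallback returns personalized + diverse.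
def pvInterleave : List (List (String × String)) → List (List (String × String)) → List (List (String × String))
  | a :: b :: c :: rest, x :: ds => a :: b :: c :: x :: pvInterleave rest ds
  | p, d => p ++ d

def natural_diversity_shuffle_alt (recommendations : List (List (String × String))) (personalized_count : Int) : List (List (String × String)) :=
  if (recommendations.length : Int) ≤ personalized_count then recommendations
  else
    pvInterleave (PySem.List.slice recommendations none (some personalized_count))
      (PySem.List.slice recommendations (some personalized_count) none)

-- ===== PRECONDITION & SPEC =====
def Spec_natural_diversity_shuffle (recommendations : List (List (String × String))) (personalized_count : Int) (out : List (List (String × String))) : Prop := out = natural_diversity_shuffle_alt recommendations personalized_count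
instance (recommendations : List (List (String × String))) (personalized_count : Int) (out : List (List (String × String))) : Decidable (Spec_natural_diversity_shuffle recommendations personalized_count out) := by unfold Spec_natural_diversity_shuffle; infer_instance

-- ===== CLAIM (what is proved, stated in full; the proofs are below) =====
def Claim_equal_natural_diversity_shuffle : Prop := ∀ (recommendations : List (List (String × String))) (personalized_count : Int), Dom_natural_diversity_shuffle recommendations personalized_count → Spec_natural_diversity_shuffle recommendations personalized_count (natural_diversity_shuffle recommendations personalized_count)

-- ===== LEMMAS AND PROOFS =====

-- induction principle consuming a list three elements at a time
theorem pvThreeInduction {α : Type} {P : List α → Prop} (h0 : P []) (h1 : ∀ a, P [a])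
    (h2 : ∀ a b, P [a, b]) (h3 : ∀ a b c rest, P rest → P (a :: b :: c :: rest)) :
    ∀ p, P p
  | [] => h0
  | [a] => h1 a
  | [a, b] => h2 a b
  | a :: b :: c :: rest => h3 a b c rest (pvThreeInduction h0 h1 h2 h3 rest)

-- once diverse_index has reached len(diverse), A's loop only appends the posts
theorem pvLoopTail (d : List (List (String × String))) :
    ∀ (p : List (List (String × String))) (k : Int) (res : List (List (String × String))),
    (PySem.List.enumerate p k).foldl
      (fun (st : List (List (String × String)) × Int) ip =>
        let result := st.1 ++ [ip.2]
        if st.2 < (d.length : Int) ∧ PySem.Int.mod (ip.1 + 1) 3 = 0 then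
          (result ++ [(PySem.List.pyGet? d st.2).getD []], st.2 + 1)
        else (result, st.2)) (res, (d.length : Int)) = (res ++ p, (d.length : Int)) := by
  intro p
  induction p with
  | nil => intro k res; simp [PySem.List.enumerate]
  | cons a t ih =>
      intro k res
      rw [PySem.List.enumerate_cons, List.foldl_cons]
      have hg : ¬ ((d.length : Int) < (d.length : Int) ∧ PySem.Int.mod (k + 1) 3 = 0) := by
        intro h; exact absurd h.1 (lt_irrefl _)
      simp only [if_neg hg]
      rw [ih (k + 1) (res ++ [a])]
      simp

-- the core invariant: A's loop (started at index k ≡ 0 mod 3, diverse_index j) followed by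
-- the final extend equals B's chunk recursion on the remaining diverse posts
theorem pvLoopSpec (d : List (List (String × String))) :
    ∀ (p : List (List (String × String))) (k : Int) (j : Nat) (res : List (List (String × String))),
    (3 : Int) ∣ k → j ≤ d.length →
    (let s := (PySem.List.enumerate p k).foldl
      (fun (st : List (List (String × String)) × Int) ip =>
        let result := st.1 ++ [ip.2]
        if st.2 < (d.length : Int) ∧ PySem.Int.mod (ip.1 + 1) 3 = 0 then
          (result ++ [(PySem.List.pyGet? d st.2).getD []], st.2 + 1)
        else (result, st.2)) (res, (j : Int));
     s.1 ++ PySem.List.slice d (some s.2) none) = res ++ pvInterleave p (d.drop j) := by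
  intro p
  induction p using pvThreeInduction with
  | h0 =>
      intro k j res _ _
      simp [PySem.List.enumerate, pvInterleave, PySem.List.slice_from_natCast]
  | h1 a =>
      intro k j res hk _
      have h1 : ¬ ((3 : Int) ∣ (k + 1)) := by omega
      simp [PySem.List.enumerate, pvInterleave, PySem.List.slice_from_natCast, h1]
  | h2 a b =>
      intro k j res hk _
      have h1 : ¬ ((3 : Int) ∣ (k + 1)) := by omega
      have h2 : ¬ ((3 : Int) ∣ (k + 1 + 1)) := by omega
      simp [PySem.List.enumerate, pvInterleave, PySem.List.slice_from_natCast, h1, h2]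
  | h3 a b c rest ih =>
      intro k j res hk hj
      have hg1 : ¬ ((j : Int) < (d.length : Int) ∧ PySem.Int.mod (k + 1) 3 = 0) := by
        intro h
        have := (PySem.Int.mod_eq_zero_iff_dvd (k + 1) 3).mp h.2
        omega
      have hg2 : ¬ ((j : Int) < (d.length : Int) ∧ PySem.Int.mod (k + 1 + 1) 3 = 0) := by
        intro h
        have := (PySem.Int.mod_eq_zero_iff_dvd (k + 1 + 1) 3).mp h.2
        omega
      have h3 : PySem.Int.mod (k + 1 + 1 + 1) 3 = 0 :=
        (PySem.Int.mod_eq_zero_iff_dvd (k + 1 + 1 + 1) 3).mpr (by omega)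
      rw [PySem.List.enumerate_cons, PySem.List.enumerate_cons, PySem.List.enumerate_cons,
        List.foldl_cons, List.foldl_cons, List.foldl_cons]
      simp only [if_neg hg1, if_neg hg2]
      by_cases hjl : j < d.length
      · have hguard : ((j : Int) < (d.length : Int) ∧ PySem.Int.mod (k + 1 + 1 + 1) 3 = 0) :=
          ⟨by exact_mod_cast hjl, h3⟩
        rw [if_pos hguard]
        have hget : (PySem.List.pyGet? d (j : Int)).getD [] = d[j] := by
          simp [PySem.List.pyGet?_natCast, List.getElem?_eq_getElem hjl]
        have hcast : ((j : Int) + 1) = ((j + 1 : Nat) : Int) := by push_cast; ring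
        rw [hget, hcast, ih (k + 1 + 1 + 1) (j + 1) (res ++ [a] ++ [b] ++ [c] ++ [d[j]])
          (by omega) (by omega)]
        rw [List.drop_eq_getElem_cons hjl]
        simp [pvInterleave]
      · have hguard : ¬ ((j : Int) < (d.length : Int) ∧ PySem.Int.mod (k + 1 + 1 + 1) 3 = 0) := by
          intro h; exact hjl (by exact_mod_cast h.1)
        rw [if_neg hguard]
        have hje : j = d.length := le_antisymm hj (le_of_not_gt hjl)
        subst hje
        rw [pvLoopTail d rest (k + 1 + 1 + 1) (res ++ [a] ++ [b] ++ [c])]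
        simp [PySem.List.slice_from_natCast, pvInterleave]

-- ===== VERDICT (by name: the statement is the Claim_ definition above) =====
theorem natural_diversity_shuffle_spec : Claim_equal_natural_diversity_shuffle := by
  intro recs count _
  unfold Spec_natural_diversity_shuffle natural_diversity_shuffle natural_diversity_shuffle_alt
  by_cases h : (recs.length : Int) ≤ count
  · simp [h]
  · simp only [if_neg h]
    have := pvLoopSpec (PySem.List.slice recs (some count) none)
      (PySem.List.slice recs none (some count)) 0 0 [] ⟨0, rfl⟩ (Nat.zero_le _)
    simpa using this
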